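-- pv_equiv track=rewrite | github.com/songjeongwoo/aivle-study | 같이 풀어볼 문제/22-01-23-문현정-음양더하기.py | solution
-- ===== SOURCE A (Python) =====
-- def solution(absolutes, signs):
--     ans=[]
--     for i in range(len(absolutes)):
--         if signs[i] == False:
--             a = absolutes[i]*(-1)
--         else:
--             a = absolutes[i]
--         ans.append(a)
--         answer= sum(ans)
--     return answer
-- ===== SOURCE B (Python) =====
-- def solution(absolutes, signs):
--     total = 0
--     for a, s in zip(absolutes, signs):
--         total += a if s else -a
--     return total
-- ===== Notes on version B (the rewrite author's own statement) =====
-- stated objective: faster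
-- what changed: Replaced the growing list with sum() recomputed on every iteration (quadratic) by a single running total over zip(absolutes, signs) added once per element.
import Mathlib
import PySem

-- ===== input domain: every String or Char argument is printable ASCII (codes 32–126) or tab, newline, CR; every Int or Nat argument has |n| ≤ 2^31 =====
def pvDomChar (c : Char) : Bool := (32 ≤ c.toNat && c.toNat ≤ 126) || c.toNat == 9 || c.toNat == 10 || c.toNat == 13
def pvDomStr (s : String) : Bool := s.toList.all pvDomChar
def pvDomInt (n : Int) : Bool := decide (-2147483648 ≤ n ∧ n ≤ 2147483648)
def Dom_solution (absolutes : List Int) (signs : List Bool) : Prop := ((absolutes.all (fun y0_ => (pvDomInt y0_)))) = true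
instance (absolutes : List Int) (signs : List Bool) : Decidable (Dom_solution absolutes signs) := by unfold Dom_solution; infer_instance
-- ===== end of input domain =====

-- B replaces A's quadratic "append then re-sum the whole list each iteration" by one
-- running total over zip(absolutes, signs), added once per element (O(n)).

-- ===== PORT A =====
-- step of A's loop body: compute the signed value, append it, recompute answer = sum(ans)
def solutionStepA (absolutes : List Int) (signs : List Bool)
    (st : List Int × Int) (i : Int) : List Int × Int :=
  let a := if (PySem.List.pyGetD signs i false) == false
           then (PySem.List.pyGetD absolutes i 0) * (-1)
           else PySem.List.pyGetD absolutes i 0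
  let ans := st.1 ++ [a]
  (ans, ans.sum)

def solution (absolutes : List Int) (signs : List Bool) : Int :=
  ((PySem.List.pyRange 0 (absolutes.length : Int) 1).foldl
      (solutionStepA absolutes signs) ([], 0)).2

-- ===== PORT B =====
def solution_alt (absolutes : List Int) (signs : List Bool) : Int :=
  (absolutes.zip signs).foldl (fun total p => total + (if p.2 then p.1 else -p.1)) 0

-- ===== PRECONDITION & SPEC =====
-- Pre_ excludes exactly the inputs where A raises: empty absolutes (the loop never runs,
-- so 'answer' is unbound → UnboundLocalError) and signs shorter than absolutes (IndexError).
def Pre_solution (absolutes : List Int) (signs : List Bool) : Prop :=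
  absolutes ≠ [] ∧ absolutes.length ≤ signs.length
instance (absolutes : List Int) (signs : List Bool) : Decidable (Pre_solution absolutes signs) := by
  unfold Pre_solution; infer_instance
def pvWitness_solution : List Int × List Bool := ([4, 7, 12], [true, false, true])

def Spec_solution (absolutes : List Int) (signs : List Bool) (out : Int) : Prop :=
  out = solution_alt absolutes signs
instance (absolutes : List Int) (signs : List Bool) (out : Int) : Decidable (Spec_solution absolutes signs out) := by
  unfold Spec_solution; infer_instance

-- ===== CLAIM (what is proved, stated in full; the proofs are below) =====
def Claim_equal_solution : Prop := ∀ (absolutes : List Int) (signs : List Bool),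
  Dom_solution absolutes signs → Pre_solution absolutes signs →
  Spec_solution absolutes signs (solution absolutes signs)

-- ===== LEMMAS AND PROOFS =====

-- the signed value A computes at index i
def solutionVal (absolutes : List Int) (signs : List Bool) (i : Int) : Int :=
  if (PySem.List.pyGetD signs i false) == false
  then (PySem.List.pyGetD absolutes i 0) * (-1)
  else PySem.List.pyGetD absolutes i 0

lemma stepA_eq (absolutes : List Int) (signs : List Bool) (st : List Int × Int) (i : Int) :
    solutionStepA absolutes signs st i =
      (st.1 ++ [solutionVal absolutes signs i], (st.1 ++ [solutionVal absolutes signs i]).sum) := by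
  rfl

-- A's fold: the accumulated list is init.1 ++ the mapped range, and for n ≥ 1 the
-- answer component is that list's sum
lemma foldA (absolutes : List Int) (signs : List Bool) (n : Nat) (init : List Int × Int) :
    (PySem.List.pyRange 0 (n : Int) 1).foldl (solutionStepA absolutes signs) init =
      (init.1 ++ (List.range n).map (fun (k : Nat) => solutionVal absolutes signs (k : Int)),
       if n = 0 then init.2
       else (init.1 ++ (List.range n).map (fun (k : Nat) => solutionVal absolutes signs (k : Int))).sum) := by
  induction n generalizing init with
  | zero => simp [PySem.List.pyRange_zero_nat]
  | succ m ih =>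
      have hsplit : PySem.List.pyRange 0 ((m : Int) + 1) 1 =
          PySem.List.pyRange 0 (m : Int) 1 ++ [(m : Int)] :=
        PySem.List.pyRange_one_succ_right (by positivity)
      push_cast
      rw [hsplit, List.foldl_append, ih, List.foldl_cons, List.foldl_nil, stepA_eq]
      rcases Nat.eq_zero_or_pos m with hm | hm
      · subst hm; simp
      · simp [List.range_succ, Nat.pos_iff_ne_zero.mp hm]

-- B's fold is the sum of the signed zip
lemma foldB (l : List (Int × Bool)) (t : Int) :
    l.foldl (fun total p => total + (if p.2 then p.1 else -p.1)) t =
      t + (l.map (fun p => if p.2 then p.1 else -p.1)).sum := by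
  induction l generalizing t with
  | nil => simp
  | cons x xs ih => simp [ih, add_assoc]

-- the two mapped lists coincide when signs is long enough
lemma maps_eq (absolutes : List Int) (signs : List Bool)
    (h : absolutes.length ≤ signs.length) :
    (List.range absolutes.length).map (fun (k : Nat) => solutionVal absolutes signs (k : Int)) =
      (absolutes.zip signs).map (fun p => if p.2 then p.1 else -p.1) := by
  apply List.ext_getElem
  · simp [List.length_zip, Nat.min_eq_left h]
  · intro k h1 h2
    have hk : k < absolutes.length := by simpa using h1
    have hks : k < signs.length := lt_of_lt_of_le hk h
    rw [List.getElem_map, List.getElem_map, List.getElem_range, List.getElem_zip]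
    simp only [solutionVal, PySem.List.pyGetD_natCast]
    rw [List.getD_eq_getElem?_getD, List.getD_eq_getElem?_getD,
        List.getElem?_eq_getElem hks, List.getElem?_eq_getElem hk]
    cases hsk : signs[k] <;> simp

-- ===== VERDICT (by name: the statement is the Claim_ definition above) =====
theorem solution_spec : Claim_equal_solution := by
  intro absolutes signs _ hpre
  unfold Spec_solution solution solution_alt
  rw [foldA, foldB]
  have hne : absolutes.length ≠ 0 := by
    simpa [List.length_eq_zero_iff] using hpre.1
  simp only [if_neg hne, List.nil_append, zero_add]
  rw [maps_eq absolutes signs hpre.2]
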